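-- pv_equiv track=rewrite | github.com/iansan5653/open-mcr | code/list_utils.py | arrange_index_to_first
-- ===== SOURCE A (Python) =====
-- import typing as tp
--
-- def next_index(items: tp.List[tp.Any], index: int) -> int:
--     """Return the next index up in the list, looping back to the beginning if needed."""
--     return index + 1 if index + 1 < len(items) else 0
--
-- def arrange_index_to_first(items: tp.List[tp.Any], index: int) -> list:
--     if index >= len(items) or index < 0:
--         raise IndexError("Index is invalid.")
--
--     result = [items[index]]
--     i = next_index(items, index)
--     while i != index:
--         result.append(items[i])
--         i = next_index(items, i)
--     return result
-- ===== SOURCE B (Python) =====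
-- import typing as tp
--
-- def arrange_index_to_first(items: tp.List[tp.Any], index: int) -> list:
--     if index >= len(items) or index < 0:
--         raise IndexError("Index is invalid.")
--     return items[index:] + items[:index]
-- ===== Notes on version B (the rewrite author's own statement) =====
-- stated objective: simpler
-- what changed: Replaces the element-by-element while-loop with a wrapped successor index by two contiguous slices concatenated (items[index:] + items[:index]), dropping the next_index helper; slicing avoids per-element append/index overhead.
import Mathlib
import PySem

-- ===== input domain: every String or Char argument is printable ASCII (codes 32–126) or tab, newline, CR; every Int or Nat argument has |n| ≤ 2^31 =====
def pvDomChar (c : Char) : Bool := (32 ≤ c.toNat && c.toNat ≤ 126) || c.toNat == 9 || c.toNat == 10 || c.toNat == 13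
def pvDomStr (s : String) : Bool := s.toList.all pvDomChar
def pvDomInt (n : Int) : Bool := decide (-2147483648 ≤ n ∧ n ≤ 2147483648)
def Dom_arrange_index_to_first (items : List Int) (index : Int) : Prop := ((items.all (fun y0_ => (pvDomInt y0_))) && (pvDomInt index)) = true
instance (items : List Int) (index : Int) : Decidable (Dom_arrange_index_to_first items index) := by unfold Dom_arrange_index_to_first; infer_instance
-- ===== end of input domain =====

-- B replaces A's while-loop over a wrapped successor index with two slice concatenations; A raises IndexError outside Pre_.
-- ===== PORT A =====
def nextIndexA (items : List Int) (i : Int) : Int :=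
  if i + 1 < (items.length : Int) then i + 1 else 0

def loopA (items : List Int) (index : Int) : Nat → Int → List Int → List Int
  | 0, _, acc => acc
  | fuel+1, i, acc =>
    if i = index then acc
    else loopA items index fuel (nextIndexA items i) (acc ++ [(PySem.List.pyGet? items i).getD 0])

def arrange_index_to_first (items : List Int) (index : Int) : List Int :=
  if (items.length : Int) ≤ index ∨ index < 0 then []  -- Python raises IndexError here (outside Pre_)
  else loopA items index items.length (nextIndexA items index) [(PySem.List.pyGet? items index).getD 0]

-- ===== PORT B =====
def arrange_index_to_first_alt (items : List Int) (index : Int) : List Int :=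
  if (items.length : Int) ≤ index ∨ index < 0 then []  -- Python raises IndexError here (outside Pre_)
  else PySem.List.slice items (some index) none ++ PySem.List.slice items none (some index)

-- ===== PRECONDITION & SPEC =====
-- Pre_: exactly the inputs on which A returns normally (A raises IndexError otherwise).
def Pre_arrange_index_to_first (items : List Int) (index : Int) : Prop :=
  0 ≤ index ∧ index < (items.length : Int)
instance (items : List Int) (index : Int) : Decidable (Pre_arrange_index_to_first items index) := by
  unfold Pre_arrange_index_to_first; infer_instance
def pvWitness_arrange_index_to_first : List Int × Int := ([3, 1, 4], 1)

def Spec_arrange_index_to_first (items : List Int) (index : Int) (out : List Int) : Prop := out = arrange_index_to_first_alt items index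
instance (items : List Int) (index : Int) (out : List Int) : Decidable (Spec_arrange_index_to_first items index out) := by unfold Spec_arrange_index_to_first; infer_instance

-- ===== CLAIM (what is proved, stated in full; the proofs are below) =====
def Claim_equal_arrange_index_to_first : Prop := ∀ (items : List Int) (index : Int), Dom_arrange_index_to_first items index → Pre_arrange_index_to_first items index → Spec_arrange_index_to_first items index (arrange_index_to_first items index)

-- ===== LEMMAS AND PROOFS =====

-- Phase 2 of the walk: from i ≤ k up to the stop index k, the loop collects items[i..k-1].
theorem loopA_below (items : List Int) (k : Nat) (hk : k < items.length) :
    ∀ (fuel i : Nat) (acc : List Int), i ≤ k → k - i ≤ fuel →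
      loopA items (k : Int) fuel (i : Int) acc = acc ++ (items.take k).drop i := by
  intro fuel
  induction fuel with
  | zero => intro i acc h1 h2
            have : i = k := by omega
            simp [loopA, this]
  | succ n ih =>
    intro i acc h1 h2
    by_cases he : i = k
    · simp [loopA, he]
    · have hik : i < k := by omega
      have hnext : nextIndexA items (i : Int) = ((i+1 : Nat) : Int) := by
        unfold nextIndexA
        have : (i : Int) + 1 < (items.length : Int) := by omega
        simp [this]
      have hg : PySem.List.pyGet? items (i : Int) = items[i]? := PySem.List.pyGet?_natCast items i
      have hi : i < items.length := by omega
      rw [loopA, if_neg (show ¬((i:Int)=(k:Int)) by exact_mod_cast he)]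
      rw [hnext, hg, ih (i+1) _ (by omega) (by omega)]
      have : (items.take k).drop i = items[i] :: (items.take k).drop (i+1) := by
        rw [List.drop_eq_getElem_cons (by simp; omega)]
        simp
      rw [this]
      simp [List.getElem?_eq_getElem hi]

-- Phase 1 of the walk: from k < i < n, the loop collects items[i..n-1] then wraps and collects items[0..k-1].
theorem loopA_above (items : List Int) (k : Nat) (hk : k < items.length) :
    ∀ (fuel i : Nat) (acc : List Int), k < i → i < items.length → items.length - i + k ≤ fuel →
      loopA items (k : Int) fuel (i : Int) acc = acc ++ items.drop i ++ items.take k := by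
  intro fuel
  induction fuel with
  | zero => intro i acc h1 h2 h3; omega
  | succ n ih =>
    intro i acc h1 h2 h3
    have hne : (i : Int) ≠ (k : Int) := by exact_mod_cast (by omega : i ≠ k)
    have hg : PySem.List.pyGet? items (i : Int) = items[i]? := PySem.List.pyGet?_natCast items i
    rw [loopA]
    simp only [if_neg hne]
    rw [hg]
    have hdrop : items.drop i = items[i] :: items.drop (i+1) := List.drop_eq_getElem_cons h2
    by_cases hlast : i + 1 < items.length
    · have hnext : nextIndexA items (i : Int) = ((i+1 : Nat) : Int) := by
        unfold nextIndexA
        have : (i : Int) + 1 < (items.length : Int) := by omega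
        simp [this]
      rw [hnext, ih (i+1) _ (by omega) hlast (by omega), hdrop]
      simp [List.getElem?_eq_getElem h2]
    · have hend : i + 1 = items.length := by omega
      have hnext : nextIndexA items (i : Int) = ((0 : Nat) : Int) := by
        unfold nextIndexA
        have : ¬ ((i : Int) + 1 < (items.length : Int)) := by omega
        simp [this]
      rw [hnext, loopA_below items k hk n 0 _ (by omega) (by omega)]
      have : items.drop (i+1) = [] := by rw [hend]; simp
      rw [hdrop, this]
      simp [List.getElem?_eq_getElem h2]

-- ===== VERDICT (by name: the statement is the Claim_ definition above) =====
theorem arrange_index_to_first_spec : Claim_equal_arrange_index_to_first := by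
  intro items index _ hpre
  obtain ⟨h0, hlen⟩ := hpre
  unfold Spec_arrange_index_to_first arrange_index_to_first arrange_index_to_first_alt
  have hguard : ¬ ((items.length : Int) ≤ index ∨ index < 0) := by omega
  simp only [if_neg hguard]
  set k := index.toNat with hkdef
  have hkcast : (k : Int) = index := Int.toNat_of_nonneg h0
  have hklt : k < items.length := by omega
  have hg : PySem.List.pyGet? items index = items[k]? := by
    rw [← hkcast]; exact PySem.List.pyGet?_natCast items k
  have hsl1 : PySem.List.slice items (some index) none = items.drop k := by
    rw [← hkcast]; exact PySem.List.slice_from_natCast items k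
  have hsl2 : PySem.List.slice items none (some index) = items.take k := by
    rw [← hkcast]; exact PySem.List.slice_to_natCast items k
  rw [hsl1, hsl2, hg]
  have hdrop : items.drop k = items[k] :: items.drop (k+1) := List.drop_eq_getElem_cons hklt
  by_cases hlast : k + 1 < items.length
  · have hnext : nextIndexA items index = ((k+1 : Nat) : Int) := by
      unfold nextIndexA
      have : index + 1 < (items.length : Int) := by omega
      simp [this]; omega
    rw [hnext, ← hkcast, loopA_above items k hklt items.length (k+1) _ (by omega) hlast (by omega), hdrop]
    simp [List.getElem?_eq_getElem hklt]
  · have hend : k + 1 = items.length := by omega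
    have hnext : nextIndexA items index = ((0 : Nat) : Int) := by
      unfold nextIndexA
      have : ¬ (index + 1 < (items.length : Int)) := by omega
      simp [this]
    rw [hnext, ← hkcast, loopA_below items k hklt items.length 0 _ (by omega) (by omega)]
    have : items.drop (k+1) = [] := by rw [hend]; simp
    rw [hdrop, this]
    simp [List.getElem?_eq_getElem hklt]
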